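-- pv_equiv track=rewrite | github.com/ITlearning/Algorithm_Solved | Python/Programmers/2020_KAKAO_BLIND/괄호변환.py | right
-- ===== SOURCE A (Python) =====
-- def right(s):
--     cnt = 0
--     for i in s:
--         if i == '(':
--             cnt += 1
--         else:
--             cnt -= 1
--
--         if cnt < 0:
--             return False
--     return True
-- ===== SOURCE B (Python) =====
-- def right(s):
--     # Phase 1: build the full running prefix-balance sequence.
--     sums = []
--     total = 0
--     for c in s:
--         total += 1 if c == '(' else -1
--         sums.append(total)
--     # Phase 2: one reduction over the table — valid iff no prefix dips below 0.
--     return not sums or min(sums) >= 0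
-- ===== Notes on version B (the rewrite author's own statement) =====
-- stated objective: alternative
-- what changed: B builds the whole prefix-balance sequence first and then reduces it with min, instead of interleaving the counter update with an early-return guard.
import Mathlib
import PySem

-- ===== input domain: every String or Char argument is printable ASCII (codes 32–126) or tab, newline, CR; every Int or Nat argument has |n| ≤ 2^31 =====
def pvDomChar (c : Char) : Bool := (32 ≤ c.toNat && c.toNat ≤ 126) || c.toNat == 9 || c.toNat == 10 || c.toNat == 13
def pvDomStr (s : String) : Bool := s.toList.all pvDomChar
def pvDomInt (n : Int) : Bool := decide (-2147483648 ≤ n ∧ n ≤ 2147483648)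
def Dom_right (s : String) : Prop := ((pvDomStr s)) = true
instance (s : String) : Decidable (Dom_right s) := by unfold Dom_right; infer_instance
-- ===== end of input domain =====

-- B interleaves nothing: it first materialises the running balances, then checks them with min.
-- ===== PORT A =====
def rightLoop : List Char → Int → Bool
  | [], _ => true
  | c :: rest, cnt =>
    let cnt' := if c = '(' then cnt + 1 else cnt - 1
    if cnt' < 0 then false else rightLoop rest cnt'

def right (s : String) : Bool := rightLoop s.toList 0

-- ===== PORT B =====
-- phase 1 of Source B: the list of running prefix balances
def rightSums : List Char → Int → List Int
  | [], _ => []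
  | c :: rest, total =>
    let t := total + (if c = '(' then 1 else -1)
    t :: rightSums rest t

def right_alt (s : String) : Bool :=
  let sums := rightSums s.toList 0
  match PySem.List.min? sums (fun x => x) with
  | none => true
  | some m => decide (0 ≤ m)

-- ===== PRECONDITION & SPEC =====
def Spec_right (s : String) (out : Bool) : Prop := out = right_alt s
instance (s : String) (out : Bool) : Decidable (Spec_right s out) := by unfold Spec_right; infer_instance

-- ===== CLAIM (what is proved, stated in full; the proofs are below) =====
def Claim_equal_right : Prop := ∀ (s : String), Dom_right s → Spec_right s (right s)

-- ===== LEMMAS AND PROOFS =====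

lemma decide_forall_eq_all (t : List Int) :
    decide (∀ y ∈ t, (0:Int) ≤ y) = t.all (fun x => decide (0 ≤ x)) := by
  induction t with
  | nil => simp
  | cons y t ih => simp at *; simp [ih]

-- the min-based check of B equals the pointwise check
lemma foldl_min_nonneg (t : List Int) (a : Int) :
    (0 ≤ t.foldl min a) ↔ (0 ≤ a ∧ ∀ y ∈ t, 0 ≤ y) := by
  induction t generalizing a with
  | nil => simp
  | cons y t ih =>
    simp only [List.foldl_cons, ih, le_min_iff, List.mem_cons]
    constructor
    · rintro ⟨⟨h1, h2⟩, h3⟩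
      exact ⟨h1, fun z hz => by rcases hz with rfl | hz; exact h2; exact h3 z hz⟩
    · rintro ⟨h1, h2⟩
      exact ⟨⟨h1, h2 y (Or.inl rfl)⟩, fun z hz => h2 z (Or.inr hz)⟩

lemma minCheck_eq_all (l : List Int) :
    (match PySem.List.min? l (fun x => x) with
     | none => true
     | some m => decide (0 ≤ m)) = l.all (fun x => decide (0 ≤ x)) := by
  cases l with
  | nil => simp [PySem.List.min?]
  | cons x t =>
    rw [PySem.List.min?_id_cons]
    simp only [foldl_min_nonneg, Bool.decide_and, List.all_cons]
    congr 1
    exact decide_forall_eq_all t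

lemma rightLoop_eq_all (l : List Char) (cnt : Int) :
    rightLoop l cnt = (rightSums l cnt).all (fun x => decide (0 ≤ x)) := by
  induction l generalizing cnt with
  | nil => simp [rightLoop, rightSums]
  | cons c rest ih =>
    simp only [rightLoop, rightSums, List.all_cons]
    have hc : (if c = '(' then cnt + 1 else cnt - 1) = cnt + (if c = '(' then 1 else -1) := by
      split <;> ring
    rw [hc]
    by_cases h : cnt + (if c = '(' then 1 else -1) < 0
    · simp [h, show ¬ (0:Int) ≤ cnt + (if c = '(' then 1 else -1) by omega]
    · simp [h, show (0:Int) ≤ cnt + (if c = '(' then 1 else -1) by omega, ih]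

-- ===== VERDICT (by name: the statement is the Claim_ definition above) =====
theorem right_spec : Claim_equal_right := by
  intro s _
  unfold Spec_right right right_alt
  rw [rightLoop_eq_all, minCheck_eq_all]
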